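-- pv_equiv track=rewrite | github.com/mariiio/rally-cut | analysis/rallycut/cli/commands/remap_track_ids.py | _build_full_mapping
-- ===== SOURCE A (Python) =====
-- def _build_full_mapping(
--     track_to_player: dict[int, int],
--     all_track_ids: set[int],
-- ) -> dict[int, int]:
--     """Build collision-safe mapping for ALL track IDs in a rally.
--
--     Mapped tracks get their player IDs (1-4).
--     Unmapped tracks keep their ID if no collision, otherwise shift to 101+.
--     """
--     mapping: dict[int, int] = {}
--     used_ids = set(track_to_player.values())
--
--     # First, add the explicit track→player mappings
--     for tid, pid in track_to_player.items():
--         mapping[tid] = pid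
--
--     # Then handle unmapped tracks
--     next_shifted = 101
--     for tid in sorted(all_track_ids):
--         if tid in mapping:
--             continue  # Already mapped
--         if tid in used_ids:
--             # Collision: this track ID conflicts with a mapped player ID
--             while next_shifted in all_track_ids or next_shifted in used_ids:
--                 next_shifted += 1
--             mapping[tid] = next_shifted
--             next_shifted += 1
--         else:
--             # No collision, keep original ID
--             mapping[tid] = tid
--
--     return mapping
-- ===== SOURCE B (Python) =====
-- def _build_full_mapping(
--     track_to_player: dict[int, int],
--     all_track_ids: set[int],
-- ) -> dict[int, int]:
--     """Build collision-safe mapping for ALL track IDs in a rally.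
--
--     Mapped tracks get their player IDs (1-4).  Unmapped tracks keep their ID
--     unless it collides with a used player ID; the colliding ones (in sorted
--     order) are paired, via zip, with the smallest free IDs >= 101, which are
--     computed in one batch as a range-minus-forbidden set difference.
--     """
--     mapping = dict(track_to_player)
--     used = set(track_to_player.values())
--     unmapped = sorted(all_track_ids - track_to_player.keys())
--     colliding = [t for t in unmapped if t in used]
--     forbidden = all_track_ids | used
--     hi = 101 + len(colliding) + len(forbidden)
--     free = sorted(set(range(101, hi)) - forbidden)
--     shifted = dict(zip(colliding, free))
--     for t in unmapped:
--         mapping[t] = shifted.get(t, t)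
--     return mapping
-- ===== Notes on version B (the rewrite author's own statement) =====
-- stated objective: alternative
-- what changed: A interleaves mapping and shifting in one stateful pass whose inline while-counter advances past forbidden IDs at each collision; B has no counter at all: it computes the whole pool of free shifted IDs in one batch as sorted(set(range(101, hi)) - forbidden), pairs the sorted colliding tracks with that pool via zip into a lookup table, and then fills the mapping with a stateless per-track table lookup.
import Mathlib
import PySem

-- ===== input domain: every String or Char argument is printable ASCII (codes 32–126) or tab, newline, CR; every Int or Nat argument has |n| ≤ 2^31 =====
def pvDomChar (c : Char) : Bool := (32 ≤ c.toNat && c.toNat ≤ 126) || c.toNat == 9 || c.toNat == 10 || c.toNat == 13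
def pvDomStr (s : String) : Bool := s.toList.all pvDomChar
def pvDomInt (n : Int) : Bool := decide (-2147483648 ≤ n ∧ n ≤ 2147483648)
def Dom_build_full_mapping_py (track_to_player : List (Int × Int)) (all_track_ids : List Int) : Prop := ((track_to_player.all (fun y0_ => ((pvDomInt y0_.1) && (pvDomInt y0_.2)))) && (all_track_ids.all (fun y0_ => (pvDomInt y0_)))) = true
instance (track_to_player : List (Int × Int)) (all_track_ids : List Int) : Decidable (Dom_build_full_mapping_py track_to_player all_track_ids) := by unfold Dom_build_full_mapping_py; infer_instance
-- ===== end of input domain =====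

-- B removes A's stateful shift counter entirely: it computes the whole pool of free shifted
-- IDs in one batch as a range-minus-forbidden set difference, pairs the sorted colliding
-- tracks with that pool via zip into a lookup table, and fills the mapping by stateless
-- per-track table lookups (objective: alternative; same output, same insertion order).

-- termination-measure fact for A's while-loop search (cited by its decreasing_by)
theorem pvFilterLenLt (l : List Int) (n : Int) (h : n ∈ l) :
    (l.filter (fun m => decide (n + 1 ≤ m))).length < (l.filter (fun m => decide (n ≤ m))).length := by
  induction l with
  | nil => cases h
  | cons a t ih =>
    have monoT : (t.filter (fun m => decide (n + 1 ≤ m))).length ≤ (t.filter (fun m => decide (n ≤ m))).length := by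
      apply List.Sublist.length_le
      apply List.monotone_filter_right
      intro x hx
      simp_all
      omega
    simp only [List.filter_cons]
    rcases List.mem_cons.mp h with rfl | ha
    · simp only [decide_eq_true_eq]
      split_ifs with h1 h2 <;> simp_all
    · have := ih ha
      simp only [decide_eq_true_eq] at *
      split_ifs with h1 h2 <;> simp_all <;> omega

-- ===== PORT A =====
-- A's inner while loop: advance next_shifted past anything in all_track_ids or used_ids
def pvWhileShiftA (ats used : List Int) (n : Int) : Int :=
  if ats.contains n || used.contains n then pvWhileShiftA ats used (n + 1) else n
termination_by ((ats ++ used).filter (fun m => decide (n ≤ m))).length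
decreasing_by
  exact pvFilterLenLt _ n (by
    rename_i h
    rcases Bool.or_eq_true_iff.mp h with h' | h' <;>
      simp [List.mem_append, List.contains_iff_mem.mp h'])

def build_full_mapping_py (track_to_player : List (Int × Int)) (all_track_ids : List Int) : List (Int × Int) :=
  let used : PySem.Set Int := PySem.Set.ofList (track_to_player.map Prod.snd)
  let mapping : PySem.Dict Int Int :=
    track_to_player.foldl (fun m p => m.insert p.1 p.2) PySem.Dict.empty
  let fin := (PySem.List.sorted all_track_ids (fun x => x) false).foldl
    (fun (st : PySem.Dict Int Int × Int) tid =>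
      if st.1.contains tid then st
      else if PySem.Set.contains used tid then
        (st.1.insert tid (pvWhileShiftA all_track_ids used st.2),
          pvWhileShiftA all_track_ids used st.2 + 1)
      else (st.1.insert tid tid, st.2))
    (mapping, 101)
  fin.1.items

-- ===== PORT B =====
def build_full_mapping_py_alt (track_to_player : List (Int × Int)) (all_track_ids : List Int) : List (Int × Int) :=
  let mapping : PySem.Dict Int Int := PySem.Dict.ofList track_to_player
  let used : PySem.Set Int := PySem.Set.ofList (track_to_player.map Prod.snd)
  let unmapped := PySem.List.sorted
    (PySem.Set.diff (PySem.Set.ofList all_track_ids) mapping.keys) (fun x => x) false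
  let colliding := unmapped.filter (fun t => PySem.Set.contains used t)
  let forbidden : PySem.Set Int := PySem.Set.union (PySem.Set.ofList all_track_ids) used
  let hi : Int := 101 + (colliding.length : Int) + (forbidden.length : Int)
  let free := PySem.List.sorted
    (PySem.Set.diff (PySem.Set.ofList (PySem.List.pyRange 101 hi 1)) forbidden) (fun x => x) false
  let shifted : PySem.Dict Int Int := PySem.Dict.ofList (colliding.zip free)
  let fin := unmapped.foldl (fun (m : PySem.Dict Int Int) t => m.insert t (shifted.getD t t)) mapping
  fin.items

-- ===== PRECONDITION & SPEC =====
-- Pre_ is the representation invariant of the Python parameter `all_track_ids : set[int]`: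
-- its List encoding holds distinct elements; a list with duplicates encodes no Python input.
def Pre_build_full_mapping_py (track_to_player : List (Int × Int)) (all_track_ids : List Int) : Prop :=
  all_track_ids.Nodup
instance (track_to_player : List (Int × Int)) (all_track_ids : List Int) : Decidable (Pre_build_full_mapping_py track_to_player all_track_ids) := by unfold Pre_build_full_mapping_py; infer_instance

def pvWitness_build_full_mapping_py : (List (Int × Int)) × List Int := ([(7, 1), (9, 2)], [2, 7, 9, 50])

def Spec_build_full_mapping_py (track_to_player : List (Int × Int)) (all_track_ids : List Int) (out : List (Int × Int)) : Prop := out = build_full_mapping_py_alt track_to_player all_track_ids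
instance (track_to_player : List (Int × Int)) (all_track_ids : List Int) (out : List (Int × Int)) : Decidable (Spec_build_full_mapping_py track_to_player all_track_ids out) := by unfold Spec_build_full_mapping_py; infer_instance

-- ===== CLAIM (what is proved, stated in full; the proofs are below) =====
def Claim_equal_build_full_mapping_py : Prop := ∀ (track_to_player : List (Int × Int)) (all_track_ids : List Int), Dom_build_full_mapping_py track_to_player all_track_ids → Pre_build_full_mapping_py track_to_player all_track_ids → Spec_build_full_mapping_py track_to_player all_track_ids (build_full_mapping_py track_to_player all_track_ids)

-- ===== LEMMAS AND PROOFS =====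

-- membership in (set(ats) | used) is membership in ats or in used
theorem pvCond_eq (ats used : List Int) (n : Int) :
    (ats.contains n || used.contains n)
      = PySem.Set.contains (PySem.Set.union (PySem.Set.ofList ats) used) n := by
  simp only [PySem.Set.contains]
  rw [Bool.eq_iff_iff]
  simp [PySem.Set.mem_union, PySem.Set.mem_ofList]

-- the least free ID from n upward is ≥ n …
theorem pvShift_le (ats used : List Int) (n : Int) : n ≤ pvWhileShiftA ats used n := by
  fun_induction pvWhileShiftA ats used n with
  | case1 n h ih => omega
  | case2 n h => omega

-- … is itself free …
theorem pvShift_not (ats used : List Int) (n : Int) :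
    (ats.contains (pvWhileShiftA ats used n) || used.contains (pvWhileShiftA ats used n)) = false := by
  fun_induction pvWhileShiftA ats used n with
  | case1 n h ih => exact ih
  | case2 n h => exact Bool.eq_false_iff.mpr h

-- … and everything it skipped is forbidden
theorem pvShift_skipped (ats used : List Int) (n : Int) :
    ∀ j, n ≤ j → j < pvWhileShiftA ats used n → (ats.contains j || used.contains j) = true := by
  fun_induction pvWhileShiftA ats used n with
  | case1 n h ih =>
    intro j hj1 hj2
    rcases eq_or_lt_of_le hj1 with rfl | hlt
    · exact h
    · exact ih j (by omega) hj2
  | case2 n h => intro j hj1 hj2; omega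

-- the successive values A's counter hands out, starting at n
def pvSeqFree (ats used : List Int) (n : Int) : Nat → List Int
  | 0 => []
  | Nat.succ k => pvWhileShiftA ats used n :: pvSeqFree ats used (pvWhileShiftA ats used n + 1) k

-- the first k free IDs of the range [n, hi) ARE the k successive counter values from n
theorem pvFilterRange_eq_seq (ats used : List Int) :
    ∀ (k : Nat) (n hi : Int),
      k ≤ (((PySem.List.pyRange n hi 1).filter
              (fun m => !(ats.contains m || used.contains m))).length) →
      ((PySem.List.pyRange n hi 1).filter
          (fun m => !(ats.contains m || used.contains m))).take k
        = pvSeqFree ats used n k := by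
  intro k
  induction k with
  | zero => intro n hi _; simp [pvSeqFree]
  | succ k ih =>
    intro n hi hlen
    set s := pvWhileShiftA ats used n with hs
    have hne : ((PySem.List.pyRange n hi 1).filter
        (fun m => !(ats.contains m || used.contains m))) ≠ [] := by
      intro h0; rw [h0] at hlen; simp at hlen
    obtain ⟨x, hx⟩ := List.exists_mem_of_ne_nil _ hne
    have hxr := List.mem_filter.mp hx
    have hxb : n ≤ x ∧ x < hi := (PySem.List.mem_pyRange_one).mp hxr.1
    have hxfree : (ats.contains x || used.contains x) = false := by
      simpa using hxr.2
    have hsx : s ≤ x := by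
      by_contra hc
      have := pvShift_skipped ats used n x hxb.1 (by omega)
      rw [this] at hxfree; cases hxfree
    have hsn : n ≤ s := pvShift_le ats used n
    have hshi : s < hi := lt_of_le_of_lt hsx hxb.2
    have hsplit := PySem.List.pyRange_one_append n s hi hsn (le_of_lt hshi)
    have hcons := PySem.List.pyRange_one_cons (a := s) (b := hi) hshi
    have hnilf : ((PySem.List.pyRange n s 1).filter
        (fun m => !(ats.contains m || used.contains m))) = [] := by
      rw [List.filter_eq_nil_iff]
      intro j hj
      have hjb := (PySem.List.mem_pyRange_one).mp hj
      have h := pvShift_skipped ats used n j hjb.1 hjb.2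
      simp only [List.contains_eq_mem, Bool.or_eq_true, decide_eq_true_eq] at h
      simp only [Bool.not_eq_true', Bool.or_eq_false_iff, List.contains_eq_mem,
        decide_eq_false_iff_not]
      tauto
    have hsf : (!(ats.contains s || used.contains s)) = true := by
      have h := pvShift_not ats used n
      rw [← hs] at h
      simpa using h
    have hEq : ((PySem.List.pyRange n hi 1).filter
          (fun m => !(ats.contains m || used.contains m)))
        = s :: ((PySem.List.pyRange (s + 1) hi 1).filter
            (fun m => !(ats.contains m || used.contains m))) := by
      rw [hsplit, List.filter_append, hnilf, List.nil_append, hcons, List.filter_cons, hsf]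
      simp
    rw [hEq] at hlen ⊢
    simp only [List.take_succ_cons, List.length_cons] at hlen ⊢
    rw [pvSeqFree]
    exact congrArg (s :: ·) (ih (s + 1) hi (by omega))

-- counting: the range [101, 101 + k + |forbidden|) holds at least k free IDs
theorem pvFreeLen (ats used F : List Int) (k : Nat)
    (hmem : ∀ m : Int, (ats.contains m || used.contains m) = true → m ∈ F) :
    k ≤ (((PySem.List.pyRange 101 (101 + (k : Int) + (F.length : Int)) 1).filter
            (fun m => !(ats.contains m || used.contains m))).length) := by
  set hi : Int := 101 + (k : Int) + (F.length : Int) with hhi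
  set R := PySem.List.pyRange 101 hi 1 with hR
  have hlenR : R.length = k + F.length := by
    rw [hR, PySem.List.length_pyRange_one]; omega
  have hcount := List.length_eq_length_filter_add
    (l := R) (fun m => !(ats.contains m || used.contains m))
  have hEq : R.filter (fun a => !(!(ats.contains a || used.contains a)))
      = R.filter (fun a => ats.contains a || used.contains a) := by
    apply List.filter_congr
    intro x _
    simp
  rw [hEq] at hcount
  have hforb : (R.filter (fun a => ats.contains a || used.contains a)).length ≤ F.length := by
    apply List.Subperm.length_le
    apply List.subperm_of_subset
    · exact List.Nodup.filter _ (PySem.List.nodup_pyRange_one 101 hi)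
    · intro x hx
      exact hmem x (List.mem_filter.mp hx).2
  omega

-- the zip lookup table: items, keys, and the two lookup facts the fold proof needs
theorem pvTable_items (colliding free : List Int)
    (hnd : colliding.Nodup) (hlen : colliding.length ≤ free.length) :
    (PySem.Dict.ofList (colliding.zip free) : PySem.Dict Int Int).items = colliding.zip free := by
  have hfold : (PySem.Dict.ofList (colliding.zip free) : PySem.Dict Int Int)
      = (colliding.zip free).foldl (fun d p => d.insert p.1 p.2) PySem.Dict.empty := rfl
  have hmapfst : (colliding.zip free).map Prod.fst = colliding := List.map_fst_zip hlen
  rw [hfold]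
  have := PySem.Dict.items_foldl_insert_fresh (colliding.zip free) Prod.fst Prod.snd
    PySem.Dict.empty (by intro a _; simp [PySem.Dict.contains_empty])
    (by rw [hmapfst]; exact hnd)
  simpa using this

theorem pvTable_keys (colliding free : List Int)
    (hnd : colliding.Nodup) (hlen : colliding.length ≤ free.length) :
    (PySem.Dict.ofList (colliding.zip free) : PySem.Dict Int Int).keys = colliding := by
  have : (PySem.Dict.ofList (colliding.zip free) : PySem.Dict Int Int).keys
      = ((PySem.Dict.ofList (colliding.zip free) : PySem.Dict Int Int)).items.map Prod.fst := rfl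
  rw [this, pvTable_items colliding free hnd hlen, List.map_fst_zip hlen]

theorem pvTable_map (colliding free : List Int)
    (hnd : colliding.Nodup) (hlen : colliding.length ≤ free.length) :
    colliding.map (fun t => (PySem.Dict.ofList (colliding.zip free) : PySem.Dict Int Int).getD t t)
      = free.take colliding.length := by
  apply List.ext_getElem
  · simp [List.length_take]; omega
  · intro i h1 h2
    simp only [List.getElem_map, List.getElem_take]
    have hiz : i < (colliding.zip free).length := by
      simp only [List.length_map] at h1; simp [List.length_zip]; omega
    have hpair : (colliding[i]'(by simpa using h1), free[i]'(by
        simp only [List.length_take] at h2; omega)) ∈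
        (PySem.Dict.ofList (colliding.zip free) : PySem.Dict Int Int).items := by
      rw [pvTable_items colliding free hnd hlen]
      have := List.getElem_zip (l := colliding) (l' := free) (i := i) (h := hiz)
      rw [← this]
      exact List.getElem_mem hiz
    exact PySem.Dict.getD_of_mem_items _ hpair
      (by rw [pvTable_keys colliding free hnd hlen]; exact hnd) _

theorem pvTable_miss (colliding free : List Int) (t : Int)
    (hnd : colliding.Nodup) (hlen : colliding.length ≤ free.length)
    (ht : t ∉ colliding) :
    (PySem.Dict.ofList (colliding.zip free) : PySem.Dict Int Int).getD t t = t := by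
  apply PySem.Dict.getD_of_not_contains
  rw [Bool.eq_false_iff]
  intro hc
  exact ht (by
    have := (PySem.Dict.contains_iff_mem_keys _ t).mp hc
    rwa [pvTable_keys colliding free hnd hlen] at this)

-- A's skip-already-mapped pass over a strictly increasing list equals the counter pass over
-- the statically filtered list, for any start state whose key set agrees with K on the list
theorem pvFold_skip (ats used : List Int) (K : PySem.Dict Int Int) :
    ∀ (l : List Int) (m : PySem.Dict Int Int) (ns : Int),
      l.Pairwise (· < ·) →
      (∀ t ∈ l, m.contains t = K.contains t) →
      l.foldl
        (fun (st : PySem.Dict Int Int × Int) tid =>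
          if st.1.contains tid then st
          else if PySem.Set.contains used tid then
            (st.1.insert tid (pvWhileShiftA ats used st.2), pvWhileShiftA ats used st.2 + 1)
          else (st.1.insert tid tid, st.2)) (m, ns)
      = (l.filter (fun t => !K.contains t)).foldl
        (fun (st : PySem.Dict Int Int × Int) tid =>
          if PySem.Set.contains used tid then
            (st.1.insert tid (pvWhileShiftA ats used st.2), pvWhileShiftA ats used st.2 + 1)
          else (st.1.insert tid tid, st.2)) (m, ns) := by
  intro l
  induction l with
  | nil => intro m ns _ _; rfl
  | cons a t ih =>
    intro m ns hp hinv
    have hlt : ∀ b ∈ t, a < b := (List.pairwise_cons.mp hp).1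
    have hpt : t.Pairwise (· < ·) := (List.pairwise_cons.mp hp).2
    have hma : m.contains a = K.contains a := hinv a (List.mem_cons_self ..)
    simp only [List.foldl_cons, List.filter_cons]
    by_cases hK : K.contains a = true
    · rw [if_pos (hma.trans hK)]
      simp only [hK, Bool.not_true, if_neg Bool.false_ne_true]
      exact ih m ns hpt (fun t' ht' => hinv t' (List.mem_cons_of_mem _ ht'))
    · have hK' : K.contains a = false := Bool.eq_false_iff.mpr hK
      rw [if_neg (by simp [hma.trans hK'])]
      simp only [hK', Bool.not_false, if_pos trivial, List.foldl_cons]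
      have hinv' : ∀ (v : Int) (t' : Int), t' ∈ t → (m.insert a v).contains t' = K.contains t' := by
        intro v t' ht'
        rw [PySem.Dict.contains_insert]
        have : (t' == a) = false := by
          simp only [beq_eq_false_iff_ne]
          exact fun e => absurd (e ▸ hlt t' ht') (lt_irrefl _)
        rw [this, Bool.false_or]
        exact hinv t' (List.mem_cons_of_mem _ ht')
      by_cases hu : PySem.Set.contains used a = true
      · simp only [if_pos hu]
        exact ih (m.insert a (pvWhileShiftA ats used ns))
          (pvWhileShiftA ats used ns + 1) hpt (hinv' _)
      · simp only [if_neg hu]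
        exact ih (m.insert a a) ns hpt (hinv' _)

-- the counter pass equals a stateless table-lookup pass whenever the table answers the
-- colliding elements with exactly the counter's successive values and misses the rest
theorem pvCounterFold_eq_table (ats used : List Int) (S : PySem.Dict Int Int) :
    ∀ (u : List Int) (m : PySem.Dict Int Int) (n : Int),
      ((u.filter (fun t => PySem.Set.contains used t)).map (fun t => S.getD t t)
        = pvSeqFree ats used n (u.filter (fun t => PySem.Set.contains used t)).length) →
      (∀ t ∈ u, PySem.Set.contains used t = false → S.getD t t = t) →
      (u.foldl
        (fun (st : PySem.Dict Int Int × Int) tid =>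
          if PySem.Set.contains used tid then
            (st.1.insert tid (pvWhileShiftA ats used st.2), pvWhileShiftA ats used st.2 + 1)
          else (st.1.insert tid tid, st.2)) (m, n)).1
      = u.foldl (fun (d : PySem.Dict Int Int) t => d.insert t (S.getD t t)) m := by
  intro u
  induction u with
  | nil => intro m n _ _; rfl
  | cons a t ih =>
    intro m n hmap hmiss
    simp only [List.foldl_cons]
    by_cases hu : PySem.Set.contains used a = true
    · simp only [List.filter_cons, hu, if_pos trivial, List.length_cons, List.map_cons,
        pvSeqFree] at hmap
      have h1 : S.getD a a = pvWhileShiftA ats used n := (List.cons.injEq _ _ _ _).mp hmap |>.1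
      have h2 := (List.cons.injEq _ _ _ _).mp hmap |>.2
      rw [if_pos hu, h1]
      exact ih (m.insert a (pvWhileShiftA ats used n)) (pvWhileShiftA ats used n + 1) h2
        (fun t' ht' => hmiss t' (List.mem_cons_of_mem _ ht'))
    · have hu' : PySem.Set.contains used a = false := Bool.eq_false_iff.mpr hu
      simp only [List.filter_cons, hu', if_neg Bool.false_ne_true] at hmap
      rw [if_neg hu, hmiss a (List.mem_cons_self ..) hu']
      exact ih (m.insert a a) n hmap (fun t' ht' => hmiss t' (List.mem_cons_of_mem _ ht'))

-- B's sorted set difference is the filtered A-side sorted list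
theorem pvUnmapped_eq (ats : List Int) (K : PySem.Dict Int Int) (hno : ats.Nodup) :
    PySem.List.sorted (PySem.Set.diff (PySem.Set.ofList ats) K.keys) (fun x => x) false
      = (PySem.List.sorted ats (fun x => x) false).filter (fun t => !K.contains t) := by
  have hof : PySem.Set.ofList ats = ats := PySem.Set.ofList_eq_self_of_nodup ats hno
  have hpred : ∀ x : Int, (!(K.keys).contains x) = (!K.contains x) := by
    intro x
    congr 1
    rw [Bool.eq_iff_iff]
    simp [PySem.Dict.contains_iff_mem_keys]
  have hstrict : (PySem.List.sorted ats (fun x => x) false).Pairwise (· < ·) := by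
    have := PySem.List.sorted_ofList_pairwise_lt (xs := ats)
    rwa [hof] at this
  have hdiff : PySem.Set.diff (PySem.Set.ofList ats) K.keys
      = ats.filter (fun t => !K.contains t) := by
    rw [PySem.Set.diff, hof]
    exact List.filter_congr (fun x _ => hpred x)
  rw [hdiff]
  apply PySem.List.sorted_eq_of_perm_of_pairwise_lt
  · exact (PySem.List.sorted_perm (xs := ats) (key := fun x => x) (rev := false)).filter _
  · exact List.Pairwise.sublist (List.filter_sublist) hstrict

-- B's free-ID pool is literally the filtered range
theorem pvFree_eq_filter (ats : List Int) (used : List Int) (hi : Int) :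
    PySem.List.sorted
        (PySem.Set.diff (PySem.Set.ofList (PySem.List.pyRange 101 hi 1))
          (PySem.Set.union (PySem.Set.ofList ats) used)) (fun x => x) false
      = (PySem.List.pyRange 101 hi 1).filter
          (fun m => !(ats.contains m || used.contains m)) := by
  have hof : PySem.Set.ofList (PySem.List.pyRange 101 hi 1) = PySem.List.pyRange 101 hi 1 :=
    PySem.Set.ofList_eq_self_of_nodup _ (PySem.List.nodup_pyRange_one 101 hi)
  have hdiff : PySem.Set.diff (PySem.Set.ofList (PySem.List.pyRange 101 hi 1))
        (PySem.Set.union (PySem.Set.ofList ats) used)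
      = (PySem.List.pyRange 101 hi 1).filter
          (fun m => !(ats.contains m || used.contains m)) := by
    rw [PySem.Set.diff, hof]
    apply List.filter_congr
    intro x _
    rw [pvCond_eq ats used x]
  rw [hdiff]
  apply PySem.List.sorted_eq_of_perm_of_pairwise_lt
  · exact List.Perm.refl _
  · exact List.Pairwise.sublist (List.filter_sublist) (PySem.List.pairwise_lt_pyRange_one 101 hi)

-- ===== VERDICT (by name: the statement is the Claim_ definition above) =====
theorem build_full_mapping_py_spec : Claim_equal_build_full_mapping_py := by
  intro t2p ats _ hpre
  unfold Spec_build_full_mapping_py build_full_mapping_py build_full_mapping_py_alt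
  have hmap : PySem.Dict.ofList t2p
      = t2p.foldl (fun m (p : Int × Int) => m.insert p.1 p.2) PySem.Dict.empty := rfl
  simp only [← hmap]
  set K : PySem.Dict Int Int := PySem.Dict.ofList t2p with hK
  set used : PySem.Set Int := PySem.Set.ofList (t2p.map Prod.snd) with hused
  rw [pvUnmapped_eq ats K hpre]
  set u := (PySem.List.sorted ats (fun x => x) false).filter (fun t => !K.contains t) with hu
  set colliding := u.filter (fun t => PySem.Set.contains used t) with hcol
  set hi : Int := 101 + (colliding.length : Int)
      + ((PySem.Set.union (PySem.Set.ofList ats) used).length : Int) with hhi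
  rw [pvFree_eq_filter ats used hi]
  set free := (PySem.List.pyRange 101 hi 1).filter
      (fun m => !(ats.contains m || used.contains m)) with hfree
  have hstrict : (PySem.List.sorted ats (fun x => x) false).Pairwise (· < ·) := by
    have := PySem.List.sorted_ofList_pairwise_lt (xs := ats)
    rwa [PySem.Set.ofList_eq_self_of_nodup ats hpre] at this
  have hundup : u.Nodup := (List.Pairwise.sublist (List.filter_sublist) hstrict).nodup
  have hcnd : colliding.Nodup := List.Nodup.filter _ hundup
  have hFmem : ∀ m : Int, (ats.contains m || List.contains used m) = true
      → m ∈ PySem.Set.union (PySem.Set.ofList ats) used := by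
    intro m hm
    rw [pvCond_eq ats used m] at hm
    exact (PySem.Set.contains_iff _ m).mp hm
  have hklen : colliding.length ≤ free.length := by
    rw [hfree]
    exact pvFreeLen ats used _ colliding.length hFmem
  have hseq : free.take colliding.length = pvSeqFree ats used 101 colliding.length := by
    rw [hfree]
    exact pvFilterRange_eq_seq ats used colliding.length 101 hi
      (pvFreeLen ats used _ colliding.length hFmem)
  rw [pvFold_skip ats used K (PySem.List.sorted ats (fun x => x) false) K 101 hstrict
    (fun _ _ => rfl)]
  rw [pvCounterFold_eq_table ats used (PySem.Dict.ofList (colliding.zip free)) u K 101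
    (by rw [← hcol, pvTable_map colliding free hcnd hklen, hseq])
    (by
      intro t htu htf
      apply pvTable_miss colliding free t hcnd hklen
      intro htc
      rw [(List.mem_filter.mp htc).2] at htf
      cases htf)]
  rfl
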